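-- pv_equiv track=rewrite | github.com/JungDayoon/AlgorithmStudy | Programmers/[12978] 배달/n__aj22/12978_delivery.py | make_road
-- ===== SOURCE A (Python) =====
-- def make_road(N, road):
--     arr = {}
--
--     for i in range(N+1):
--         arr[i] = {}
--
--     for i in road:
--         if(i[1] in arr[i[0]]):
--             if(arr[i[0]][i[1]]<i[2]):
--                 continue
--         arr[i[0]][i[1]] = i[2]
--         arr[i[1]][i[0]] = i[2]
--
--     return arr
-- ===== SOURCE B (Python) =====
-- def make_road(N, road):
--     # pass 1: minimum weight per unordered pair, keyed by the sorted pair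
--     best = {}
--     for e in road:
--         k = (e[0], e[1]) if e[0] <= e[1] else (e[1], e[0])
--         if k not in best or e[2] < best[k]:
--             best[k] = e[2]
--     # pass 2: build the adjacency structure; each pair is written once, at
--     # its first occurrence, directly with its final (minimum) weight
--     arr = {i: {} for i in range(N + 1)}
--     for e in road:
--         if e[1] not in arr[e[0]]:
--             w = best[(e[0], e[1]) if e[0] <= e[1] else (e[1], e[0])]
--             arr[e[0]][e[1]] = w
--             arr[e[1]][e[0]] = w
--     return arr
-- ===== Notes on version B (the rewrite author's own statement) =====
-- stated objective: alternative
-- what changed: A interleaves a membership-and-compare branch with in-place overwrites while filling the adjacency dict; B first builds a minimum-weight-per-pair index keyed by the sorted endpoint pair, then fills the adjacency dict in a second pass writing each pair exactly once, at its first occurrence, directly with its final minimum weight.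
import Mathlib
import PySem

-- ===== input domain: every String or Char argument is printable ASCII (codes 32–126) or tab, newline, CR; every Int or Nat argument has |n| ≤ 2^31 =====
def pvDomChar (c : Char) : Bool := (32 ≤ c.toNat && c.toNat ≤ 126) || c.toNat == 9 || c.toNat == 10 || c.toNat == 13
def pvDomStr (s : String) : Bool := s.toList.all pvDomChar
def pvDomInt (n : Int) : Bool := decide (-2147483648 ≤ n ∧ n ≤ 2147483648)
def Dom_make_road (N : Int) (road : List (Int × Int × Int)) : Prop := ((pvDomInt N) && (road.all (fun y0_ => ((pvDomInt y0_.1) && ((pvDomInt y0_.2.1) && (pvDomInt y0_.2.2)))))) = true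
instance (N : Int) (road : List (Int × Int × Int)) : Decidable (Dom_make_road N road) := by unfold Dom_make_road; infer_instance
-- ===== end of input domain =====

-- B replaces A's interleaved compare-and-overwrite updates by two passes: a minimum-per-pair
-- index built first, then each pair written once (at first occurrence) with its final weight;
-- objective: alternative (same asymptotic cost, no in-loop overwrites).

-- ===== PORT A =====
-- one iteration of A's edge loop: 'if i[1] in arr[i[0]] and arr[i[0]][i[1]] < i[2]: continue;
-- arr[i[0]][i[1]] = i[2]; arr[i[1]][i[0]] = i[2]'; 'none' branches are Python's KeyError (outside Pre_)
def pvStepA (arr : PySem.Dict Int (PySem.Dict Int Int)) (e : Int × Int × Int) :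
    PySem.Dict Int (PySem.Dict Int Int) :=
  match arr.get? e.1 with
  | none => arr
  | some inner =>
    if (match inner.get? e.2.1 with | some v => decide (v < e.2.2) | none => false) then arr
    else
      let arr1 := arr.insert e.1 (inner.insert e.2.1 e.2.2)
      match arr1.get? e.2.1 with
      | none => arr1
      | some inner2 => arr1.insert e.2.1 (inner2.insert e.1 e.2.2)

def make_road (N : Int) (road : List (Int × Int × Int)) : List (Int × List (Int × Int)) :=
  let arr0 := (PySem.List.pyRange 0 (N + 1) 1).foldl
      (fun d i => d.insert i PySem.Dict.empty) PySem.Dict.empty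
  ((road.foldl pvStepA arr0).items.map (fun p => (p.1, p.2.items)))

-- ===== PORT B =====
-- '(e[0], e[1]) if e[0] <= e[1] else (e[1], e[0])'
def pvCanon (a b : Int) : Int × Int := if a ≤ b then (a, b) else (b, a)

-- pass 1 body: 'if k not in best or e[2] < best[k]: best[k] = e[2]'
def pvStepBest (d : PySem.Dict (Int × Int) Int) (e : Int × Int × Int) :
    PySem.Dict (Int × Int) Int :=
  let k := pvCanon e.1 e.2.1
  if (!d.contains k) || decide (e.2.2 < d.getD k 0) then d.insert k e.2.2 else d

-- pass 2 body: 'if e[1] not in arr[e[0]]: w = best[…]; arr[e[0]][e[1]] = w; arr[e[1]][e[0]] = w';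
-- 'none' branches are Python's KeyError (outside Pre_; the best-lookup one never fires)
def pvStepB (best : PySem.Dict (Int × Int) Int) (arr : PySem.Dict Int (PySem.Dict Int Int))
    (e : Int × Int × Int) : PySem.Dict Int (PySem.Dict Int Int) :=
  match arr.get? e.1 with
  | none => arr
  | some inner =>
    if inner.contains e.2.1 then arr
    else
      match best.get? (pvCanon e.1 e.2.1) with
      | none => arr
      | some w =>
        let arr1 := arr.insert e.1 (inner.insert e.2.1 w)
        match arr1.get? e.2.1 with
        | none => arr1
        | some inner2 => arr1.insert e.2.1 (inner2.insert e.1 w)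

def make_road_alt (N : Int) (road : List (Int × Int × Int)) : List (Int × List (Int × Int)) :=
  let best := road.foldl pvStepBest PySem.Dict.empty
  let arr0 := (PySem.List.pyRange 0 (N + 1) 1).foldl
      (fun d i => d.insert i PySem.Dict.empty) PySem.Dict.empty
  ((road.foldl (pvStepB best) arr0).items.map (fun p => (p.1, p.2.items)))

-- ===== PRECONDITION & SPEC =====
-- Pre_ excludes exactly the inputs on which the Python A raises KeyError: an edge with an
-- endpoint outside the node range 0..N.
def Pre_make_road (N : Int) (road : List (Int × Int × Int)) : Prop :=
  ∀ e ∈ road, 0 ≤ e.1 ∧ e.1 ≤ N ∧ 0 ≤ e.2.1 ∧ e.2.1 ≤ N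
instance (N : Int) (road : List (Int × Int × Int)) : Decidable (Pre_make_road N road) := by
  unfold Pre_make_road; infer_instance
def pvWitness_make_road : Int × (List (Int × Int × Int)) := (2, [(0, 1, 3), (1, 2, 1), (0, 1, 2)])

def Spec_make_road (N : Int) (road : List (Int × Int × Int)) (out : List (Int × List (Int × Int))) : Prop := out = make_road_alt N road
instance (N : Int) (road : List (Int × Int × Int)) (out : List (Int × List (Int × Int))) : Decidable (Spec_make_road N road out) := by unfold Spec_make_road; infer_instance

-- ===== CLAIM (what is proved, stated in full; the proofs are below) =====
def Claim_equal_make_road : Prop := ∀ (N : Int) (road : List (Int × Int × Int)), Dom_make_road N road → Pre_make_road N road → Spec_make_road N road (make_road N road)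

-- ===== LEMMAS AND PROOFS =====

def pvOmin (o : Option Int) (w : Int) : Option Int :=
  some (match o with | none => w | some v => min v w)

def pvWts (l : List (Int × Int × Int)) (k : Int × Int) : List Int :=
  (l.filter (fun e => decide (pvCanon e.1 e.2.1 = k))).map (fun e => e.2.2)

theorem pvCanon_eq_iff (a b x y : Int) :
    pvCanon a b = pvCanon x y ↔ (a = x ∧ b = y) ∨ (a = y ∧ b = x) := by
  unfold pvCanon; split_ifs <;> simp [Prod.ext_iff] <;> omega

theorem pvCanon_comm (a b : Int) : pvCanon a b = pvCanon b a := by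
  rw [pvCanon_eq_iff]; omega

theorem pvWts_cons (e : Int × Int × Int) (l : List (Int × Int × Int)) (k : Int × Int) :
    pvWts (e :: l) k =
      (if pvCanon e.1 e.2.1 = k then [e.2.2] else []) ++ pvWts l k := by
  unfold pvWts; by_cases h : pvCanon e.1 e.2.1 = k <;> simp [h]

theorem pvOminFoldl_some (l : List Int) (v : Int) :
    ∃ u, l.foldl pvOmin (some v) = some u := by
  induction l generalizing v with
  | nil => exact ⟨v, rfl⟩
  | cons c t ih => simpa [pvOmin] using ih (min v c)

theorem pvOminFoldl_none_iff (l : List Int) :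
    l.foldl pvOmin none = none ↔ l = [] := by
  cases l with
  | nil => simp
  | cons c t =>
    simp only [List.foldl_cons, pvOmin]
    obtain ⟨u, hu⟩ := pvOminFoldl_some t c
    simp [hu]

-- (d.insert k v).keys as a Set.add, uniformly over whether k is present
theorem pvKeysInsert {κ ν : Type} [BEq κ] [LawfulBEq κ] (d : PySem.Dict κ ν) (k : κ) (v : ν) :
    (d.insert k v).keys = PySem.Set.add d.keys k := by
  by_cases h : d.contains k = true
  · rw [PySem.Dict.keys_insert_of_contains d v h,
      PySem.Set.add_of_mem ((PySem.Dict.contains_iff_mem_keys _ _).1 h)]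
  · have h' : d.contains k = false := by revert h; cases d.contains k <;> simp
    rw [PySem.Dict.keys_insert_of_not_contains d v h',
      PySem.Set.add_of_not_mem (fun hm => by
        exact absurd ((PySem.Dict.contains_iff_mem_keys _ _).2 hm) (by simp [h']))]

theorem pvGetSome {κ ν : Type} [BEq κ] [LawfulBEq κ] (d : PySem.Dict κ ν) (k : κ) (dflt : ν)
    (h : k ∈ d.keys) : d.get? k = some (d.getD k dflt) := by
  have hc : d.contains k = true := (PySem.Dict.contains_iff_mem_keys _ _).2 h
  rw [PySem.Dict.contains_eq_isSome_get?] at hc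
  rcases hg : d.get? k with _ | v
  · rw [hg] at hc; simp at hc
  · rw [PySem.Dict.getD_of_get?_eq_some d dflt hg]

theorem pvGetNone {κ ν : Type} [BEq κ] [LawfulBEq κ] (d : PySem.Dict κ ν) (k : κ)
    (h : k ∉ d.keys) : d.get? k = none :=
  (PySem.Dict.get?_eq_none_iff_not_mem_keys _ _).2 h

-- extensionality for dicts with the same key list
theorem pvDictExt {κ ν : Type} [BEq κ] [LawfulBEq κ] (d d' : PySem.Dict κ ν) (dflt : ν)
    (hk : d.keys = d'.keys) (hnd : d.keys.Nodup) (hg : ∀ k, d.get? k = d'.get? k) :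
    d = d' := by
  apply PySem.Dict.ext
  rw [PySem.Dict.items_eq_map_keys d hnd dflt,
    PySem.Dict.items_eq_map_keys d' (hk ▸ hnd) dflt, hk]
  apply List.map_congr_left
  intro k _
  rw [PySem.Dict.getD_eq_get?_getD, PySem.Dict.getD_eq_get?_getD, hg]

-- the shared shape of both ports' update: arr[a][b] = u; arr[b][a] = u
def pvDIns (arr : PySem.Dict Int (PySem.Dict Int Int)) (a b u : Int) :
    PySem.Dict Int (PySem.Dict Int Int) :=
  let arr1 := arr.insert a ((arr.getD a PySem.Dict.empty).insert b u)
  arr1.insert b ((arr1.getD b PySem.Dict.empty).insert a u)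

theorem pvDIns_getD (arr : PySem.Dict Int (PySem.Dict Int Int)) (a b u x : Int) :
    (pvDIns arr a b u).getD x PySem.Dict.empty =
      if x = b then ((if b = a then (arr.getD a PySem.Dict.empty).insert b u
                      else arr.getD b PySem.Dict.empty).insert a u)
      else if x = a then (arr.getD a PySem.Dict.empty).insert b u
      else arr.getD x PySem.Dict.empty := by
  unfold pvDIns
  simp only [PySem.Dict.getD_insert]

theorem pvDIns_keys (arr : PySem.Dict Int (PySem.Dict Int Int)) (a b u : Int)
    (ha : a ∈ arr.keys) (hb : b ∈ arr.keys) :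
    (pvDIns arr a b u).keys = arr.keys := by
  unfold pvDIns
  rw [pvKeysInsert, pvKeysInsert, PySem.Set.add_of_mem ha, PySem.Set.add_of_mem hb]

theorem pvDIns_inner_keys (arr : PySem.Dict Int (PySem.Dict Int Int)) (a b u x : Int) :
    ((pvDIns arr a b u).getD x PySem.Dict.empty).keys =
      if x = b then PySem.Set.add (if b = a then PySem.Set.add ((arr.getD a PySem.Dict.empty).keys) b
                                   else (arr.getD b PySem.Dict.empty).keys) a
      else if x = a then PySem.Set.add ((arr.getD a PySem.Dict.empty).keys) b
      else (arr.getD x PySem.Dict.empty).keys := by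
  rw [pvDIns_getD]
  by_cases h1 : x = b
  · simp only [h1]
    by_cases h2 : b = a <;> simp [h2, pvKeysInsert]
  · by_cases h2 : x = a
    · have hab : ¬ a = b := fun h => h1 (h2.trans h)
      simp [h2, hab, pvKeysInsert]
    · simp [h1, h2]

theorem pvDIns_get? (arr : PySem.Dict Int (PySem.Dict Int Int)) (a b u x y : Int) :
    ((pvDIns arr a b u).getD x PySem.Dict.empty).get? y =
      if (x = a ∧ y = b) ∨ (x = b ∧ y = a) then some u
      else (arr.getD x PySem.Dict.empty).get? y := by
  rw [pvDIns_getD]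
  by_cases hba : b = a <;> by_cases hxb : x = b <;> by_cases hxa : x = a <;>
    by_cases hyb : y = b <;> by_cases hya : y = a <;>
      simp_all [PySem.Dict.get?_insert]

theorem pvMain (best : PySem.Dict (Int × Int) Int) (N : Int) :
    ∀ (s : List (Int × Int × Int)) (sA sB : PySem.Dict Int (PySem.Dict Int Int))
      (W : Int × Int → List Int),
    (∀ e ∈ s, 0 ≤ e.1 ∧ e.1 ≤ N ∧ 0 ≤ e.2.1 ∧ e.2.1 ≤ N) →
    (∀ x : Int, x ∈ sA.keys ↔ 0 ≤ x ∧ x ≤ N) →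
    sA.keys = sB.keys →
    sA.keys.Nodup →
    (∀ x : Int, (sA.getD x PySem.Dict.empty).keys = (sB.getD x PySem.Dict.empty).keys) →
    (∀ x : Int, (sA.getD x PySem.Dict.empty).keys.Nodup) →
    (∀ x y : Int, (sA.getD x PySem.Dict.empty).get? y = (W (pvCanon x y)).foldl pvOmin none) →
    (∀ x y : Int, (sB.getD x PySem.Dict.empty).get? y =
        ((W (pvCanon x y)).foldl pvOmin none).bind
          (fun _ => (W (pvCanon x y) ++ pvWts s (pvCanon x y)).foldl pvOmin none)) →
    (∀ k : Int × Int, best.get? k = (W k ++ pvWts s k).foldl pvOmin none) →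
    s.foldl pvStepA sA = s.foldl (pvStepB best) sB := by
  intro s
  induction s with
  | nil =>
    intro sA sB W _ _ hkeq hnod hik hinod hA hB _
    simp only [List.foldl_nil]
    refine pvDictExt sA sB PySem.Dict.empty hkeq hnod ?_
    intro x
    by_cases hx : x ∈ sA.keys
    · rw [pvGetSome sA x PySem.Dict.empty hx, pvGetSome sB x PySem.Dict.empty (hkeq ▸ hx)]
      congr 1
      refine pvDictExt _ _ 0 (hik x) (hinod x) ?_
      intro y
      rw [hA x y, hB x y]
      have hnilw : pvWts ([] : List (Int × Int × Int)) (pvCanon x y) = [] := rfl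
      rw [hnilw, List.append_nil]
      cases hf : (W (pvCanon x y)).foldl pvOmin none <;> simp
    · rw [pvGetNone sA x hx, pvGetNone sB x (hkeq ▸ hx)]
  | cons e t ih =>
    intro sA sB W hs hAkeys hkeq hnod hik hinod hA hB hbest
    obtain ⟨ha0, haN, hb0, hbN⟩ := hs e (by simp)
    have haA : e.1 ∈ sA.keys := (hAkeys e.1).2 ⟨ha0, haN⟩
    have hbA : e.2.1 ∈ sA.keys := (hAkeys e.2.1).2 ⟨hb0, hbN⟩
    have hgA : sA.get? e.1 = some (sA.getD e.1 PySem.Dict.empty) :=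
      pvGetSome _ _ _ haA
    have hgB : sB.get? e.1 = some (sB.getD e.1 PySem.Dict.empty) :=
      pvGetSome _ _ _ (hkeq ▸ haA)
    simp only [List.foldl_cons]
    set kab := pvCanon e.1 e.2.1 with hkab
    set W' : Int × Int → List Int :=
      fun k => if k = kab then W k ++ [e.2.2] else W k with hW'
    have hW'ne : ∀ k : Int × Int, ¬ k = kab → W' k = W k := by
      intro k h; simp [hW', h]
    have hshift : ∀ k : Int × Int, W' k ++ pvWts t k = W k ++ pvWts (e :: t) k := by
      intro k
      rw [pvWts_cons, ← hkab]
      by_cases h : k = kab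
      · subst h; simp [hW', List.append_assoc]
      · have h' : ¬ (kab = k) := fun hh => h hh.symm
        simp [hW', h, h']
    have hbest' : ∀ k : Int × Int, best.get? k = (W' k ++ pvWts t k).foldl pvOmin none := by
      intro k; rw [hshift]; exact hbest k
    have hwtsne : ∀ k : Int × Int, ¬ k = kab → pvWts (e :: t) k = pvWts t k := by
      intro k h
      have h' : ¬ (kab = k) := fun hh => h hh.symm
      rw [pvWts_cons, ← hkab]
      simp [h']
    by_cases hmem : e.2.1 ∈ (sA.getD e.1 PySem.Dict.empty).keys
    · -- the pair was seen before: B skips this edge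
      have hcB : (sB.getD e.1 PySem.Dict.empty).contains e.2.1 = true :=
        (PySem.Dict.contains_iff_mem_keys _ _).2 (hik e.1 ▸ hmem)
      have hBstep : pvStepB best sB e = sB := by
        simp [pvStepB, hgB, hcB]
      obtain ⟨v, hv⟩ : ∃ v, (sA.getD e.1 PySem.Dict.empty).get? e.2.1 = some v := by
        rcases hg : (sA.getD e.1 PySem.Dict.empty).get? e.2.1 with _ | v
        · exact absurd ((PySem.Dict.get?_eq_none_iff_not_mem_keys _ _).1 hg) (by simp [hmem])
        · exact ⟨v, rfl⟩
      have hWv : (W kab).foldl pvOmin none = some v := by rw [← hA e.1 e.2.1, hv]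
      have hW'kab : (W' kab).foldl pvOmin none = some (min v e.2.2) := by
        simp [hW', List.foldl_append, hWv, pvOmin]
      have hB' : ∀ x y : Int, (sB.getD x PySem.Dict.empty).get? y =
          ((W' (pvCanon x y)).foldl pvOmin none).bind
            (fun _ => (W' (pvCanon x y) ++ pvWts t (pvCanon x y)).foldl pvOmin none) := by
        intro x y
        rw [hB x y]
        by_cases hxy : pvCanon x y = kab
        · rw [hxy, hWv, hW'kab]
          simp only [Option.bind_some]
          rw [hshift kab]
        · rw [hW'ne _ hxy, hwtsne _ hxy]
      by_cases hvw : v < e.2.2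
      · -- A skips too
        have hAstep : pvStepA sA e = sA := by
          simp [pvStepA, hgA, hv, hvw]
        rw [hAstep, hBstep]
        refine ih sA sB W' (fun x hx => hs x (List.mem_cons_of_mem _ hx))
          hAkeys hkeq hnod hik hinod ?_ hB' hbest'
        intro x y
        by_cases hxy : pvCanon x y = kab
        · rw [hA x y, hxy, hWv, hW'kab, min_eq_left (le_of_lt hvw)]
        · rw [hA x y, hW'ne _ hxy]
      · -- A overwrites both stored copies with the new, not larger, weight
        have hk1 : (sA.insert e.1 ((sA.getD e.1 PySem.Dict.empty).insert e.2.1 e.2.2)).keys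
            = sA.keys := by
          rw [pvKeysInsert, PySem.Set.add_of_mem haA]
        have hg1 := pvGetSome
          (sA.insert e.1 ((sA.getD e.1 PySem.Dict.empty).insert e.2.1 e.2.2))
          e.2.1 PySem.Dict.empty (by rw [hk1]; exact hbA)
        have hAstep : pvStepA sA e = pvDIns sA e.1 e.2.1 e.2.2 := by
          simp [pvStepA, hgA, hv, hvw, pvDIns, hg1]
        rw [hAstep, hBstep]
        have hmem' : e.1 ∈ (sA.getD e.2.1 PySem.Dict.empty).keys := by
          have hsym := hA e.2.1 e.1
          rw [pvCanon_comm, ← hkab, hWv] at hsym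
          by_contra hn
          rw [pvGetNone _ _ hn] at hsym
          exact absurd hsym (by simp)
        have hkeys' : (pvDIns sA e.1 e.2.1 e.2.2).keys = sA.keys :=
          pvDIns_keys sA e.1 e.2.1 e.2.2 haA hbA
        have hinner' : ∀ x : Int,
            ((pvDIns sA e.1 e.2.1 e.2.2).getD x PySem.Dict.empty).keys
              = (sA.getD x PySem.Dict.empty).keys := by
          intro x
          rw [pvDIns_inner_keys]
          by_cases h1 : x = e.2.1
          · rw [if_pos h1, h1]
            by_cases h2 : e.2.1 = e.1
            · rw [if_pos h2, PySem.Set.add_of_mem hmem, h2,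
                PySem.Set.add_of_mem (h2 ▸ hmem)]
            · rw [if_neg h2, PySem.Set.add_of_mem hmem']
          · rw [if_neg h1]
            by_cases h2 : x = e.1
            · rw [if_pos h2, h2, PySem.Set.add_of_mem hmem]
            · rw [if_neg h2]
        refine ih (pvDIns sA e.1 e.2.1 e.2.2) sB W'
          (fun x hx => hs x (List.mem_cons_of_mem _ hx))
          (fun x => hkeys' ▸ hAkeys x) (hkeys'.trans hkeq) (hkeys' ▸ hnod)
          (fun x => (hinner' x).trans (hik x)) (fun x => (hinner' x) ▸ hinod x)
          ?_ hB' hbest'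
        intro x y
        rw [pvDIns_get?]
        by_cases hxy : (x = e.1 ∧ y = e.2.1) ∨ (x = e.2.1 ∧ y = e.1)
        · rw [if_pos hxy]
          have hcxy : pvCanon x y = kab := by
            rw [hkab, pvCanon_eq_iff]; tauto
          rw [hcxy, hW'kab, min_eq_right (not_lt.mp hvw)]
        · rw [if_neg hxy]
          have hcxy : ¬ pvCanon x y = kab := by
            rw [hkab, pvCanon_eq_iff]; tauto
          rw [hA x y, hW'ne _ hcxy]
    · -- first edge on this pair: both sides write it, B directly with the final minimum
      have hgAb : (sA.getD e.1 PySem.Dict.empty).get? e.2.1 = none := pvGetNone _ _ hmem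
      have hWnil : W kab = [] := by
        have h := hA e.1 e.2.1
        rw [hgAb, ← hkab] at h
        exact (pvOminFoldl_none_iff _).1 h.symm
      have hcBf : (sB.getD e.1 PySem.Dict.empty).contains e.2.1 = false := by
        rw [PySem.Dict.contains_eq_isSome_get?, pvGetNone _ _ (hik e.1 ▸ hmem)]
        rfl
      obtain ⟨wb, hwb⟩ : ∃ wb, (pvWts t kab).foldl pvOmin (some e.2.2) = some wb :=
        pvOminFoldl_some _ _
      have hbestkab : best.get? kab = some wb := by
        rw [hbest kab, hWnil, pvWts_cons, ← hkab]
        simpa [pvOmin] using hwb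
      have hW'kab : (W' kab).foldl pvOmin none = some e.2.2 := by
        simp [hW', hWnil, pvOmin]
      have hk1 : (sA.insert e.1 ((sA.getD e.1 PySem.Dict.empty).insert e.2.1 e.2.2)).keys
          = sA.keys := by
        rw [pvKeysInsert, PySem.Set.add_of_mem haA]
      have hg1 := pvGetSome
        (sA.insert e.1 ((sA.getD e.1 PySem.Dict.empty).insert e.2.1 e.2.2))
        e.2.1 PySem.Dict.empty (by rw [hk1]; exact hbA)
      have hAstep : pvStepA sA e = pvDIns sA e.1 e.2.1 e.2.2 := by
        simp [pvStepA, hgA, hgAb, pvDIns, hg1]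
      have hk1B : (sB.insert e.1 ((sB.getD e.1 PySem.Dict.empty).insert e.2.1 wb)).keys
          = sB.keys := by
        rw [pvKeysInsert, PySem.Set.add_of_mem (hkeq ▸ haA)]
      have hg1B := pvGetSome
        (sB.insert e.1 ((sB.getD e.1 PySem.Dict.empty).insert e.2.1 wb))
        e.2.1 PySem.Dict.empty (by rw [hk1B, ← hkeq]; exact hbA)
      have hBstep : pvStepB best sB e = pvDIns sB e.1 e.2.1 wb := by
        simp only [pvStepB, hgB, hcBf]
        rw [← hkab, hbestkab]
        simp [pvDIns, hg1B]
      rw [hAstep, hBstep]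
      have hkeysA' : (pvDIns sA e.1 e.2.1 e.2.2).keys = sA.keys :=
        pvDIns_keys sA e.1 e.2.1 e.2.2 haA hbA
      have hkeysB' : (pvDIns sB e.1 e.2.1 wb).keys = sB.keys :=
        pvDIns_keys sB e.1 e.2.1 wb (hkeq ▸ haA) (hkeq ▸ hbA)
      have hik' : ∀ x : Int,
          ((pvDIns sA e.1 e.2.1 e.2.2).getD x PySem.Dict.empty).keys
            = ((pvDIns sB e.1 e.2.1 wb).getD x PySem.Dict.empty).keys := by
        intro x
        rw [pvDIns_inner_keys, pvDIns_inner_keys, hik e.1, hik e.2.1, hik x]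
      have hinod' : ∀ x : Int,
          ((pvDIns sA e.1 e.2.1 e.2.2).getD x PySem.Dict.empty).keys.Nodup := by
        intro x
        rw [pvDIns_inner_keys]
        by_cases h1 : x = e.2.1
        · rw [if_pos h1]
          by_cases h2 : e.2.1 = e.1
          · rw [if_pos h2]
            exact PySem.Set.nodup_add _ _ (PySem.Set.nodup_add _ _ (hinod e.1))
          · rw [if_neg h2]
            exact PySem.Set.nodup_add _ _ (hinod e.2.1)
        · rw [if_neg h1]
          by_cases h2 : x = e.1
          · rw [if_pos h2]
            exact PySem.Set.nodup_add _ _ (hinod e.1)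
          · rw [if_neg h2]
            exact hinod x
      refine ih (pvDIns sA e.1 e.2.1 e.2.2) (pvDIns sB e.1 e.2.1 wb) W'
        (fun x hx => hs x (List.mem_cons_of_mem _ hx))
        (fun x => hkeysA' ▸ hAkeys x) (by rw [hkeysA', hkeysB', hkeq]) (hkeysA' ▸ hnod)
        hik' hinod' ?_ ?_ hbest'
      · intro x y
        rw [pvDIns_get?]
        by_cases hxy : (x = e.1 ∧ y = e.2.1) ∨ (x = e.2.1 ∧ y = e.1)
        · rw [if_pos hxy]
          have hcxy : pvCanon x y = kab := by
            rw [hkab, pvCanon_eq_iff]; tauto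
          rw [hcxy, hW'kab]
        · rw [if_neg hxy]
          have hcxy : ¬ pvCanon x y = kab := by
            rw [hkab, pvCanon_eq_iff]; tauto
          rw [hA x y, hW'ne _ hcxy]
      · intro x y
        rw [pvDIns_get?]
        by_cases hxy : (x = e.1 ∧ y = e.2.1) ∨ (x = e.2.1 ∧ y = e.1)
        · rw [if_pos hxy]
          have hcxy : pvCanon x y = kab := by
            rw [hkab, pvCanon_eq_iff]; tauto
          rw [hcxy, hW'kab]
          simp only [Option.bind_some]
          have hW'l : W' kab = [e.2.2] := by simp [hW', hWnil]
          rw [hW'l]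
          simpa [pvOmin] using hwb.symm
        · rw [if_neg hxy]
          have hcxy : ¬ pvCanon x y = kab := by
            rw [hkab, pvCanon_eq_iff]; tauto
          rw [hB x y, hW'ne _ hcxy, hwtsne _ hcxy]
theorem pvStepBest_get? (d : PySem.Dict (Int × Int) Int) (e : Int × Int × Int) (k : Int × Int) :
    (pvStepBest d e).get? k =
      if pvCanon e.1 e.2.1 = k then pvOmin (d.get? k) e.2.2 else d.get? k := by
  unfold pvStepBest pvOmin
  by_cases hk : pvCanon e.1 e.2.1 = k
  · simp only [hk]
    rcases hg : d.get? k with _ | v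
    · have hc : d.contains k = false := by
        rw [PySem.Dict.contains_eq_isSome_get?, hg]; rfl
      simp [hc, PySem.Dict.get?_insert_self]
    · have hc : d.contains k = true := by
        rw [PySem.Dict.contains_eq_isSome_get?, hg]; rfl
      have hD : d.getD k 0 = v := PySem.Dict.getD_of_get?_eq_some d 0 hg
      by_cases hw : e.2.2 < v
      · simp [hc, hD, hw, PySem.Dict.get?_insert_self, min_eq_right (le_of_lt hw)]
      · simp [hc, hD, hw, hg, min_eq_left (not_lt.mp hw)]
  · by_cases hc : (!d.contains (pvCanon e.1 e.2.1)) || decide (e.2.2 < d.getD (pvCanon e.1 e.2.1) 0)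
    · simp only [hc, if_true, hk, if_false]
      exact PySem.Dict.get?_insert_of_ne _ _ (fun h => hk h.symm) 
    · simp [hc, hk]

theorem pvBest_get? (l : List (Int × Int × Int)) (d : PySem.Dict (Int × Int) Int) (k : Int × Int) :
    (l.foldl pvStepBest d).get? k = (pvWts l k).foldl pvOmin (d.get? k) := by
  induction l generalizing d with
  | nil => simp [pvWts]
  | cons e t ih =>
    simp only [List.foldl_cons]
    rw [ih]
    by_cases h : pvCanon e.1 e.2.1 = k
    · simp [pvWts, h, pvStepBest_get?]
    · simp [pvWts, h, pvStepBest_get?]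

theorem pvInit_get? (L : List Int) (d : PySem.Dict Int (PySem.Dict Int Int)) (x : Int) :
    (L.foldl (fun d i => d.insert i PySem.Dict.empty) d).get? x =
      if x ∈ L then some PySem.Dict.empty else d.get? x := by
  induction L generalizing d with
  | nil => simp
  | cons i L ih =>
    simp only [List.foldl_cons]
    rw [ih]
    by_cases hx : x ∈ L
    · simp [hx]
    · simp [hx, PySem.Dict.get?_insert]

def pvInitArr (N : Int) : PySem.Dict Int (PySem.Dict Int Int) :=
  (PySem.List.pyRange 0 (N + 1) 1).foldl (fun d i => d.insert i PySem.Dict.empty) PySem.Dict.empty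

theorem pvInitArr_keys (N : Int) : (pvInitArr N).keys = PySem.List.pyRange 0 (N + 1) 1 := by
  unfold pvInitArr
  rw [PySem.Dict.keys_foldl_insert (f := fun _ _ => PySem.Dict.empty)]
  rw [PySem.Dict.keys_empty, PySem.Set.update_nil_left,
    PySem.Set.ofList_eq_self_of_nodup _ (PySem.List.nodup_pyRange_one 0 (N + 1))]

theorem pvInitArr_getD (N x : Int) : (pvInitArr N).getD x PySem.Dict.empty = PySem.Dict.empty := by
  unfold pvInitArr
  rw [PySem.Dict.getD_eq_get?_getD, pvInit_get?]
  by_cases h : x ∈ PySem.List.pyRange 0 (N + 1) 1 <;> simp [h]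

-- ===== VERDICT (by name: the statement is the Claim_ definition above) =====
theorem make_road_spec : Claim_equal_make_road := by
  unfold Claim_equal_make_road
  intro N road _ hpre
  unfold Spec_make_road
  have hmain := pvMain (road.foldl pvStepBest PySem.Dict.empty) N road
    (pvInitArr N) (pvInitArr N) (fun _ => []) hpre
    (by intro x
        rw [pvInitArr_keys, PySem.List.mem_pyRange_one]
        omega)
    rfl
    (by rw [pvInitArr_keys]; exact PySem.List.nodup_pyRange_one 0 (N + 1))
    (fun x => rfl)
    (by intro x
        rw [pvInitArr_getD, PySem.Dict.keys_empty]
        exact List.nodup_nil)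
    (by intro x y
        rw [pvInitArr_getD, PySem.Dict.get?_empty]
        rfl)
    (by intro x y
        rw [pvInitArr_getD, PySem.Dict.get?_empty]
        rfl)
    (by intro k
        rw [pvBest_get?, PySem.Dict.get?_empty]
        rfl)
  exact congrArg (List.map (fun p => (p.1, p.2.items))) (congrArg PySem.Dict.items hmain)
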